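-- pv_equiv track=rewrite | github.com/MariiaNikitash/DSA | CodePath_TIP103/dicts/sesh2.py | find_balanced_subsequence
-- ===== SOURCE A (Python) =====
-- def find_balanced_subsequence(art_pieces):
--     d = {}
--     longest = 0
--     for a in art_pieces:
--         d[a] = d.get(a, 0) + 1
--
--     for num in d:
--             if num + 1 in d:
--                 longest = max(longest, d[num] + d[num+1])
--
--     return longest
-- ===== SOURCE B (Python) =====
-- def find_balanced_subsequence(art_pieces):
--     groups = []  # run-length encoding of the sorted list: (value, count), values strictly increasing
--     for x in sorted(art_pieces):
--         if groups and groups[-1][0] == x: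
--             groups[-1] = (x, groups[-1][1] + 1)
--         else:
--             groups.append((x, 1))
--     longest = 0
--     for (u, cu), (v, cv) in zip(groups, groups[1:]):
--         if v == u + 1:
--             longest = max(longest, cu + cv)
--     return longest
-- ===== Notes on version B (the rewrite author's own statement) =====
-- stated objective: alternative
-- what changed: Replaces A's dict counting plus successor-key lookup by sorting the list, run-length encoding it into (value, count) groups, and scanning adjacent groups for consecutive values.
import Mathlib
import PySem

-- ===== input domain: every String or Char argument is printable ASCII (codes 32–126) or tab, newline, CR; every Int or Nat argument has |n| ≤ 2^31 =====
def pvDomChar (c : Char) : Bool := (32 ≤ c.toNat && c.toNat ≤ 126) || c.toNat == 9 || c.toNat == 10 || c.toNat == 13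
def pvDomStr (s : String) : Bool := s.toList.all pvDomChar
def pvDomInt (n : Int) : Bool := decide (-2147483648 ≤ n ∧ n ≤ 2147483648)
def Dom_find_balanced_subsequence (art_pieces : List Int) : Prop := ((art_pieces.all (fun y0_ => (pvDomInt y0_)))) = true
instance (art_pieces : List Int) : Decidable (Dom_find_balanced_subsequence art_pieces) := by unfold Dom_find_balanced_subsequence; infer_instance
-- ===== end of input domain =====

-- B replaces A's dict-count-then-successor-lookup by sort, run-length encode, and scan adjacent value groups (objective: alternative algorithm, same result).

-- ===== PORT A =====
-- literal port: d = {}; for a: d[a] = d.get(a,0)+1; then for num in d: if num+1 in d: longest = max(longest, d[num]+d[num+1]).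
-- d[num] / d[num+1] are ported as getD _ 0, exact here because both keys are present when read.
def find_balanced_subsequence (art_pieces : List Int) : Int :=
  let d := art_pieces.foldl (fun d a => d.insert a (d.getD a 0 + 1)) PySem.Dict.empty
  d.keys.foldl (fun longest num =>
    if d.contains (num + 1) then max longest (d.getD num 0 + d.getD (num + 1) 0) else longest) 0

-- ===== PORT B =====
-- literal port of Source B: groups = run-length encoding of sorted(art_pieces), built left to right
-- (the groups[-1] read/update is ported via getLast?/dropLast on the nonempty case); then
-- for (u, cu), (v, cv) in zip(groups, groups[1:]): if v == u + 1: longest = max(longest, cu + cv).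
def find_balanced_subsequence_alt (art_pieces : List Int) : Int :=
  let groups := (PySem.List.sorted art_pieces (fun x => x) false).foldl
    (fun (gs : List (Int × Int)) x =>
      match gs.getLast? with
      | some g => if g.1 == x then gs.dropLast ++ [(x, g.2 + 1)] else gs ++ [(x, 1)]
      | none => gs ++ [(x, 1)])
    []
  (groups.zip (PySem.List.slice groups (some 1) none)).foldl
    (fun longest gg =>
      if gg.2.1 == gg.1.1 + 1 then max longest (gg.1.2 + gg.2.2) else longest) 0

-- ===== PRECONDITION & SPEC =====
def Spec_find_balanced_subsequence (art_pieces : List Int) (out : Int) : Prop := out = find_balanced_subsequence_alt art_pieces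
instance (art_pieces : List Int) (out : Int) : Decidable (Spec_find_balanced_subsequence art_pieces out) := by unfold Spec_find_balanced_subsequence; infer_instance

-- ===== CLAIM (what is proved, stated in full; the proofs are below) =====
def Claim_equal_find_balanced_subsequence : Prop := ∀ (art_pieces : List Int), Dom_find_balanced_subsequence art_pieces → Spec_find_balanced_subsequence art_pieces (find_balanced_subsequence art_pieces)

-- ===== LEMMAS AND PROOFS =====

-- the candidate value contributed by a distinct value n of xs
def bsCand (xs : List Int) (n : Int) : Int :=
  if (n + 1) ∈ xs then ((List.count n xs : Int) + (List.count (n + 1) xs : Int)) else 0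

-- B's adjacent-pair scan, as a named fold
def scanPairs (c : Int → Int) (acc : Int) (ps : List (Int × Int)) : Int :=
  ps.foldl (fun L uv => if uv.2 = uv.1 + 1 then max L (c uv.1) else L) acc

-- the per-element "successor present in l" fold
def scanMem (c : Int → Int) (l : List Int) (acc : Int) (l' : List Int) : Int :=
  l'.foldl (fun L n => max L (if (n + 1) ∈ l then c n else 0)) acc

-- one step of B's run-length-encoding loop
def rleStep (gs : List (Int × Int)) (x : Int) : List (Int × Int) :=
  match gs.getLast? with
  | some g => if g.1 == x then gs.dropLast ++ [(x, g.2 + 1)] else gs ++ [(x, 1)]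
  | none => gs ++ [(x, 1)]

-- the "if P then max L c else L" loop equals the "max L (if P then c else 0)" loop from a nonnegative start
theorem foldl_ite_max (P : Int → Prop) [DecidablePred P] (c : Int → Int) :
    ∀ (l : List Int) (acc : Int), 0 ≤ acc →
      List.foldl (fun L n => if P n then max L (c n) else L) acc l
        = List.foldl (fun L n => max L (if P n then c n else 0)) acc l := by
  intro l
  induction l with
  | nil => intro acc _; rfl
  | cons n t ih =>
    intro acc hacc
    simp only [List.foldl_cons]
    by_cases h : P n
    · simp only [h, if_pos]
      exact ih _ (le_trans hacc (le_max_left _ _))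
    · simp only [h, if_neg, not_false_iff, max_eq_left hacc]
      exact ih _ hacc

-- A computes the max of bsCand over the distinct values of xs (in first-occurrence order)
theorem A_eq (xs : List Int) :
    find_balanced_subsequence xs
      = List.foldl (fun L n => max L (bsCand xs n)) 0 (PySem.Set.ofList xs) := by
  unfold find_balanced_subsequence
  rw [PySem.Dict.foldl_insert_getD_add_one_eq_counter]
  simp only [PySem.Dict.keys_counter, PySem.Dict.contains_counter, PySem.Dict.getD_counter,
    List.contains_eq_mem, decide_eq_true_eq]
  rw [foldl_ite_max (fun n => (n + 1) ∈ xs)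
        (fun n => ((List.count n xs : Int) + (List.count (n + 1) xs : Int))) _ 0 le_rfl]
  simp only [bsCand]

-- replacing the reference list of the membership test by a tail it belongs to
theorem scanMem_drop_head (c : Int → Int) (u v : Int) (t : List Int) (acc : Int)
    (huv : u < v) (hvt : ∀ w ∈ t, v < w) :
    scanMem c (v :: t) acc (v :: t) = scanMem c (u :: v :: t) acc (v :: t) := by
  unfold scanMem
  apply PySem.List.foldl_congr_mem
  intro L w hw
  have hwge : v ≤ w := by
    rcases List.mem_cons.mp hw with h | h
    · omega
    · have := hvt _ h; omega
  have hiff : ((w + 1) ∈ u :: v :: t) ↔ (w + 1) ∈ v :: t := by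
    constructor
    · intro h
      rcases List.mem_cons.mp h with h | h
      · omega
      · exact h
    · intro h; exact List.mem_cons_of_mem _ h
  simp only [hiff]

-- core scan lemma: on a strictly increasing list, the adjacent-pair scan equals the
-- per-element "successor present in the list" fold
theorem pair_scan (c : Int → Int) :
    ∀ (l : List Int), l.Pairwise (· < ·) → ∀ (acc : Int), 0 ≤ acc →
      scanPairs c acc (l.zip l.tail) = scanMem c l acc l := by
  intro l
  induction l with
  | nil => intro _ acc _; rfl
  | cons u rest ih =>
    intro hp acc hacc
    rcases rest with _ | ⟨v, t⟩
    · -- singleton: no pair, and u+1 ∉ [u]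
      show acc = max acc (if (u + 1) ∈ [u] then c u else 0)
      rw [if_neg (by simp), max_eq_left hacc]
    · have hp' : (v :: t).Pairwise (· < ·) := hp.of_cons
      have huv : u < v := (List.pairwise_cons.mp hp).1 v (List.mem_cons_self ..)
      have hvt : ∀ w ∈ t, v < w := fun w hw => (List.pairwise_cons.mp hp').1 w hw
      -- membership of u+1 in the full list is exactly "v = u+1"
      have hmem : ((u + 1) ∈ u :: v :: t) ↔ v = u + 1 := by
        constructor
        · intro h
          rcases List.mem_cons.mp h with h | h
          · omega
          · rcases List.mem_cons.mp h with h | h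
            · omega
            · have := hvt _ h; omega
        · intro h; subst h; exact List.mem_cons_of_mem _ (List.mem_cons_self ..)
      have hacc1 : 0 ≤ (if v = u + 1 then max acc (c u) else acc) := by
        split
        · exact le_trans hacc (le_max_left _ _)
        · exact hacc
      have haccEq : (if v = u + 1 then max acc (c u) else acc)
          = max acc (if (u + 1) ∈ u :: v :: t then c u else 0) := by
        by_cases hv : v = u + 1
        · rw [if_pos hv, if_pos (hmem.mpr hv)]
        · rw [if_neg hv, if_neg (fun h => hv (hmem.mp h)), max_eq_left hacc]
      calc scanPairs c acc ((u :: v :: t).zip (u :: v :: t).tail)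
          = scanPairs c (if v = u + 1 then max acc (c u) else acc) ((v :: t).zip (v :: t).tail) := rfl
        _ = scanMem c (v :: t) (if v = u + 1 then max acc (c u) else acc) (v :: t) := ih hp' _ hacc1
        _ = scanMem c (u :: v :: t) (if v = u + 1 then max acc (c u) else acc) (v :: t) :=
            scanMem_drop_head c u v t _ huv hvt
        _ = scanMem c (u :: v :: t) (max acc (if (u + 1) ∈ u :: v :: t then c u else 0)) (v :: t) := by
            rw [haccEq]
        _ = scanMem c (u :: v :: t) acc (u :: v :: t) := rfl

-- in a strictly increasing list, an upper-bound member is the last element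
theorem getLast?_of_mem_forall_le (x : Int) :
    ∀ (l : List Int), l.Pairwise (· < ·) → x ∈ l → (∀ y ∈ l, y ≤ x) → l.getLast? = some x := by
  intro l
  induction l with
  | nil => intro _ hx _; cases hx
  | cons a t ih =>
    intro hp hx hle
    rcases t with _ | ⟨b, t'⟩
    · simp only [List.mem_singleton] at hx
      simp [hx]
    · rw [List.getLast?_cons_cons]
      have hab : a < b := (List.pairwise_cons.mp hp).1 b (List.mem_cons_self ..)
      rcases List.mem_cons.mp hx with h | h
      · exfalso
        have := hle b (List.mem_cons_of_mem _ (List.mem_cons_self ..))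
        omega
      · exact ih hp.of_cons h (fun y hy => hle y (List.mem_cons_of_mem _ hy))

-- evaluating one RLE step on a list ending in a group, or on the empty list
theorem rleStep_concat_eq (gs : List (Int × Int)) (c x : Int) :
    rleStep (gs ++ [(x, c)]) x = gs ++ [(x, c + 1)] := by
  simp [rleStep]

theorem rleStep_concat_ne (gs : List (Int × Int)) (g : Int × Int) (x : Int) (h : g.1 ≠ x) :
    rleStep (gs ++ [g]) x = gs ++ [g] ++ [(x, 1)] := by
  simp [rleStep, h]

-- the RLE loop over a (≤)-sorted list produces the sorted distinct values with their counts
theorem rle_eq :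
    ∀ (s : List Int), s.Pairwise (· ≤ ·) →
      s.foldl rleStep []
        = (PySem.List.sorted (PySem.Set.ofList s) (fun x => x) false).map
            (fun u => (u, (List.count u s : Int))) := by
  intro s
  induction s using List.reverseRecOn with
  | nil => intro _; rfl
  | append_singleton s' x ih =>
    intro hs
    have hp' : s'.Pairwise (· ≤ ·) := (List.pairwise_append.mp hs).1
    have hle : ∀ y ∈ s', y ≤ x := fun y hy =>
      (List.pairwise_append.mp hs).2.2 y hy x (List.mem_singleton_self x)
    rw [List.foldl_append, ih hp', List.foldl_cons, List.foldl_nil]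
    have hvlt : (PySem.List.sorted (PySem.Set.ofList s') (fun x => x) false).Pairwise (· < ·) :=
      PySem.List.sorted_ofList_pairwise_lt s'
    have hvnd : (PySem.List.sorted (PySem.Set.ofList s') (fun x => x) false).Nodup :=
      (PySem.List.sorted_perm (PySem.Set.ofList s') (fun x => x) false).nodup_iff.mpr
        (PySem.Set.nodup_ofList s')
    have hvmem : ∀ y, y ∈ PySem.List.sorted (PySem.Set.ofList s') (fun x => x) false ↔ y ∈ s' :=
      fun y => by rw [PySem.List.mem_sorted, PySem.Set.mem_ofList]
    by_cases hx : x ∈ s'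
    · -- x already occurs: its run is the last group, whose count is bumped
      have hlast : (PySem.List.sorted (PySem.Set.ofList s') (fun x => x) false).getLast? = some x :=
        getLast?_of_mem_forall_le x _ hvlt ((hvmem x).mpr hx)
          (fun y hy => hle y ((hvmem y).mp hy))
      obtain ⟨w, hw⟩ := List.getLast?_eq_some_iff.mp hlast
      have hxnotw : x ∉ w := by
        rw [hw] at hvnd
        have := (List.nodup_append.mp hvnd).2.2
        exact fun hm => this x hm x (List.mem_singleton_self x) rfl
      have hvals : PySem.List.sorted (PySem.Set.ofList (s' ++ [x])) (fun x => x) false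
          = PySem.List.sorted (PySem.Set.ofList s') (fun x => x) false := by
        apply PySem.List.sorted_eq_sorted_of_perm _ _ _ (fun a b h => h)
        rw [List.perm_ext_iff_of_nodup (PySem.Set.nodup_ofList _) (PySem.Set.nodup_ofList _)]
        intro y
        rw [PySem.Set.mem_ofList, PySem.Set.mem_ofList, List.mem_append, List.mem_singleton]
        constructor
        · rintro (h | rfl)
          · exact h
          · exact hx
        · exact Or.inl
      rw [hvals, hw, List.map_append, List.map_singleton, rleStep_concat_eq,
        List.map_append, List.map_singleton]
      congr 1
      · -- counts of the earlier groups are unchanged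
        apply List.map_congr_left
        intro u hu
        have hune : u ≠ x := fun h => hxnotw (h ▸ hu)
        have h0 : List.count u [x] = 0 := by
          rw [List.count_singleton']
          simp only [ite_eq_right_iff]
          omega
        rw [List.count_append, h0]
        simp
      · -- the last group's count goes up by one
        have h1 : List.count x [x] = 1 := by rw [List.count_singleton]; simp
        rw [List.count_append, h1]
        push_cast
        ring_nf
    · -- x is new: it opens a fresh (x, 1) group at the end
      have hvals : PySem.List.sorted (PySem.Set.ofList (s' ++ [x])) (fun x => x) false
          = PySem.List.sorted (PySem.Set.ofList s') (fun x => x) false ++ [x] := by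
        apply PySem.List.sorted_eq_of_perm_of_pairwise_lt
        · rw [List.perm_ext_iff_of_nodup
            (by
              rw [List.nodup_append]
              refine ⟨hvnd, List.nodup_singleton x, ?_⟩
              intro y hy z hz
              rw [List.mem_singleton] at hz
              rw [hz]
              exact fun h => hx (h ▸ (hvmem y).mp hy))
            (PySem.Set.nodup_ofList _)]
          intro y
          rw [List.mem_append, List.mem_singleton, PySem.Set.mem_ofList, List.mem_append,
            List.mem_singleton, hvmem]
        · rw [List.pairwise_append]
          refine ⟨hvlt, List.pairwise_singleton _ _, ?_⟩
          intro y hy z hz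
          rw [List.mem_singleton] at hz
          rw [hz]
          have h1 := hle y ((hvmem y).mp hy)
          have h2 : y ≠ x := fun h => hx (h ▸ (hvmem y).mp hy)
          omega
      have hstep : rleStep ((PySem.List.sorted (PySem.Set.ofList s') (fun x => x) false).map
            (fun u => (u, (List.count u s' : Int)))) x
          = ((PySem.List.sorted (PySem.Set.ofList s') (fun x => x) false).map
            (fun u => (u, (List.count u s' : Int)))) ++ [(x, 1)] := by
        rcases hlv : (PySem.List.sorted (PySem.Set.ofList s') (fun x => x) false).getLast?
          with _ | m
        · rw [List.getLast?_eq_none_iff.mp hlv]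
          rfl
        · obtain ⟨w, hw⟩ := List.getLast?_eq_some_iff.mp hlv
          have hm : m ∈ PySem.List.sorted (PySem.Set.ofList s') (fun x => x) false := by
            rw [hw]; exact List.mem_append_right _ (List.mem_singleton_self m)
          have hmne : m ≠ x := fun h => hx (h ▸ (hvmem m).mp hm)
          rw [hw, List.map_append, List.map_singleton, rleStep_concat_ne _ _ _ hmne]
      rw [hvals, List.map_append, List.map_singleton, hstep]
      congr 1
      · apply List.map_congr_left
        intro u hu
        have hune : u ≠ x := fun h => hx (h ▸ (hvmem u).mp hu)
        have h0 : List.count u [x] = 0 := by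
          rw [List.count_singleton']
          simp only [ite_eq_right_iff]
          omega
        rw [List.count_append, h0]
        simp
      · have h1 : List.count x [x] = 1 := by rw [List.count_singleton]; simp
        rw [List.count_append, h1, List.count_eq_zero_of_not_mem hx]
        simp

-- B computes the max of bsCand over the sorted distinct values of sorted(xs)
theorem B_eq (xs : List Int) :
    find_balanced_subsequence_alt xs
      = List.foldl (fun L n => max L (bsCand xs n)) 0
          (PySem.List.sorted
            (PySem.Set.ofList (PySem.List.sorted xs (fun x => x) false)) (fun x => x) false) := by
  simp only [find_balanced_subsequence_alt]
  have hs : (PySem.List.sorted xs (fun x => x) false).Pairwise (· ≤ ·) :=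
    PySem.List.sorted_pairwise xs (fun x => x)
  have hsp : (PySem.List.sorted xs (fun x => x) false).Perm xs :=
    PySem.List.sorted_perm xs (fun x => x) false
  rw [show (PySem.List.sorted xs (fun x => x) false).foldl
      (fun (gs : List (Int × Int)) x =>
        match gs.getLast? with
        | some g => if g.1 == x then gs.dropLast ++ [(x, g.2 + 1)] else gs ++ [(x, 1)]
        | none => gs ++ [(x, 1)]) []
      = (PySem.List.sorted xs (fun x => x) false).foldl rleStep [] from rfl,
    rle_eq _ hs]
  have h1 : PySem.List.slice
      ((PySem.List.sorted (PySem.Set.ofList (PySem.List.sorted xs (fun x => x) false))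
          (fun x => x) false).map
        (fun u => (u, (List.count u (PySem.List.sorted xs (fun x => x) false) : Int))))
      (some 1) none
      = ((PySem.List.sorted (PySem.Set.ofList (PySem.List.sorted xs (fun x => x) false))
          (fun x => x) false).map
        (fun u => (u, (List.count u (PySem.List.sorted xs (fun x => x) false) : Int)))).tail := by
    rw [show (1 : Int) = ((1 : Nat) : Int) from rfl, PySem.List.slice_from_natCast,
      List.drop_one]
  rw [h1, ← List.map_tail, List.zip_map, List.foldl_map]
  simp only [Prod.map_fst, Prod.map_snd, beq_iff_eq, hsp.count_eq]
  have hfun : (fun (L : Int) (p : Int × Int) =>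
        if p.2 = p.1 + 1 then
          max L ((List.count p.1 xs : Int) + (List.count p.2 xs : Int)) else L)
      = (fun (L : Int) (p : Int × Int) =>
        if p.2 = p.1 + 1 then
          max L ((List.count p.1 xs : Int) + (List.count (p.1 + 1) xs : Int)) else L) := by
    funext L p
    by_cases h : p.2 = p.1 + 1
    · rw [if_pos h, if_pos h, h]
    · rw [if_neg h, if_neg h]
  rw [hfun]
  rw [show List.foldl (fun (L : Int) (p : Int × Int) =>
        if p.2 = p.1 + 1 then
          max L ((List.count p.1 xs : Int) + (List.count (p.1 + 1) xs : Int)) else L)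
        0 ((PySem.List.sorted (PySem.Set.ofList (PySem.List.sorted xs (fun x => x) false))
            (fun x => x) false).zip
          (PySem.List.sorted (PySem.Set.ofList (PySem.List.sorted xs (fun x => x) false))
            (fun x => x) false).tail)
      = scanPairs (fun n => (List.count n xs : Int) + (List.count (n + 1) xs : Int)) 0
        ((PySem.List.sorted (PySem.Set.ofList (PySem.List.sorted xs (fun x => x) false))
            (fun x => x) false).zip
          (PySem.List.sorted (PySem.Set.ofList (PySem.List.sorted xs (fun x => x) false))
            (fun x => x) false).tail) from rfl]
  rw [pair_scan (fun n => ((List.count n xs : Int) + (List.count (n + 1) xs : Int))) _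
        (PySem.List.sorted_ofList_pairwise_lt (PySem.List.sorted xs (fun x => x) false)) 0 le_rfl]
  unfold scanMem
  apply PySem.List.foldl_congr_mem
  intro L n _
  have hiff : ((n + 1) ∈ PySem.List.sorted
        (PySem.Set.ofList (PySem.List.sorted xs (fun x => x) false)) (fun x => x) false)
      ↔ (n + 1) ∈ xs := by
    rw [PySem.List.mem_sorted, PySem.Set.mem_ofList, hsp.mem_iff]
  simp only [hiff, bsCand]

-- ===== VERDICT (by name: the statement is the Claim_ definition above) =====
theorem find_balanced_subsequence_spec : Claim_equal_find_balanced_subsequence := by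
  intro xs _
  unfold Spec_find_balanced_subsequence
  rw [A_eq, B_eq]
  haveI : RightCommutative (fun (L : Int) (n : Int) => max L (bsCand xs n)) :=
    ⟨fun b a₁ a₂ => by simp [max_right_comm]⟩
  refine (List.Perm.foldl_eq ?_ 0).symm
  refine (PySem.List.sorted_perm _ _ _).trans ?_
  rw [List.perm_ext_iff_of_nodup (PySem.Set.nodup_ofList _) (PySem.Set.nodup_ofList _)]
  intro y
  rw [PySem.Set.mem_ofList, PySem.Set.mem_ofList,
    (PySem.List.sorted_perm xs (fun x => x) false).mem_iff]
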